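-- pv_equiv track=rewrite | github.com/maglili/neetcode-submissions-shdan7v6 | Data Structures & Algorithms/valid-sudoku/submission-3.py | chk_row
-- ===== SOURCE A (Python) =====
-- def chk_row(board):
--     for row in board:
--         tbl = set()
--         for num in row:
--             if num == '.':
--                 continue
--             if num not in tbl:
--                 tbl.add(num)
--             else:
--                 return 1
--     return 0
-- ===== SOURCE B (Python) =====
-- def chk_row(board):
--     def dup_sorted(row):
--         ds = sorted(x for x in row if x != '.')
--         return any(a == b for a, b in zip(ds, ds[1:]))
--     return 1 if any(dup_sorted(row) for row in board) else 0
-- ===== Notes on version B (the rewrite author's own statement) =====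
-- stated objective: alternative
-- what changed: Instead of maintaining a hash set with a per-cell membership branch and early return, B sorts each row's non-'.' digits and detects a duplicate as an equal adjacent pair in the sorted list (sort-then-scan), wrapped over all rows with any().
import Mathlib
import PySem

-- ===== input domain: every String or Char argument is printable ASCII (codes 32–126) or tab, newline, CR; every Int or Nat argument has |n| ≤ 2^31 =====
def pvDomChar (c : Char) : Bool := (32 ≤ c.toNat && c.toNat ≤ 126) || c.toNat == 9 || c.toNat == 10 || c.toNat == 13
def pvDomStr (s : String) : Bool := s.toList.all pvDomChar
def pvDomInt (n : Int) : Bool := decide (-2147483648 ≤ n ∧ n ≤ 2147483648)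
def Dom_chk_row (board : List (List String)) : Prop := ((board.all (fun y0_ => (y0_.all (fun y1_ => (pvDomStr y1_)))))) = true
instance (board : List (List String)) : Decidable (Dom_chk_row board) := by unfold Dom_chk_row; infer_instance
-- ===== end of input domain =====

-- B replaces the incremental set-membership check with sort-then-adjacent-scan per row (alternative algorithm).

-- ===== PORT A =====
-- inner 'for num in row' loop: returns true when the early 'return 1' fires
def chkRowLoop : List String → PySem.Set String → Bool
  | [], _ => false
  | num :: rest, tbl =>
    if num = "." then chkRowLoop rest tbl
    else if PySem.Set.contains tbl num then true
    else chkRowLoop rest (PySem.Set.add tbl num)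

def chk_row : List (List String) → Int
  | [] => 0
  | row :: rest => if chkRowLoop row PySem.Set.empty then 1 else chk_row rest

-- ===== PORT B =====
-- ds = sorted(x for x in row if x != '.'); any(a == b for a, b in zip(ds, ds[1:]))
def dupSorted (row : List String) : Bool :=
  let ds := PySem.List.sorted (row.filter (fun x => x ≠ ".")) (fun x => x) false
  (ds.zip (ds.drop 1)).any (fun p => p.1 == p.2)

def chk_row_alt (board : List (List String)) : Int :=
  if board.any dupSorted then 1 else 0

-- ===== PRECONDITION & SPEC =====
def Spec_chk_row (board : List (List String)) (out : Int) : Prop := out = chk_row_alt board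
instance (board : List (List String)) (out : Int) : Decidable (Spec_chk_row board out) := by unfold Spec_chk_row; infer_instance

-- ===== CLAIM (what is proved, stated in full; the proofs are below) =====
def Claim_equal_chk_row : Prop := ∀ (board : List (List String)), Dom_chk_row board → Spec_chk_row board (chk_row board)

-- ===== LEMMAS AND PROOFS =====

-- A's inner loop fires exactly when tbl ++ (filtered row) has a repeat
theorem pv_loop_iff (row : List String) :
    ∀ (tbl : PySem.Set String), tbl.Nodup →
      (chkRowLoop row tbl = true ↔ ¬ (tbl ++ row.filter (fun x => x ≠ ".")).Nodup) := by
  induction row with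
  | nil => intro tbl h; simp [chkRowLoop, h]
  | cons num rest ih =>
    intro tbl h
    by_cases hdot : num = "."
    · simp [chkRowLoop, hdot, ih tbl h]
    · by_cases hmem : num ∈ tbl
      · have hrhs : ¬ (tbl ++ (num :: rest).filter (fun x => x ≠ ".")).Nodup := by
          rw [List.filter_cons_of_pos (by simp [hdot])]
          intro hnd
          rw [List.nodup_append] at hnd
          exact hnd.2.2 num hmem num (by simp) rfl
        have hl : chkRowLoop (num :: rest) tbl = true := by
          simp [chkRowLoop, hdot]
          exact Or.inl hmem
        rw [hl]
        exact ⟨fun _ => hrhs, fun _ => rfl⟩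
      · have hc : PySem.Set.contains tbl num = false := by
          cases hcc : PySem.Set.contains tbl num with
          | false => rfl
          | true => exact absurd ((PySem.Set.contains_iff _ _).mp hcc) hmem
        rw [List.filter_cons_of_pos (by simp [hdot])]
        simp only [chkRowLoop, if_neg hdot, hc, Bool.false_eq_true, if_false]
        rw [PySem.Set.add_of_not_mem hmem]
        have hsy : (tbl ++ [num]).Nodup := by
          rw [List.nodup_append]
          refine ⟨h, List.nodup_singleton _, ?_⟩
          intro a ha b hb
          simp at hb
          subst hb
          rintro rfl
          exact hmem ha
        rw [ih (tbl ++ [num]) hsy, List.append_assoc]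
        rfl

-- a (≤)-pairwise list has an equal adjacent pair iff it is not duplicate-free
theorem pv_adj_iff (l : List String) (hp : l.Pairwise (· ≤ ·)) :
    (l.zip (l.drop 1)).any (fun p => p.1 == p.2) = true ↔ ¬ l.Nodup := by
  induction l with
  | nil => simp
  | cons a t ih =>
    cases t with
    | nil => simp
    | cons b t' =>
      have hp' : (b :: t').Pairwise (· ≤ ·) := hp.tail
      have hab : a ≤ b := (List.pairwise_cons.mp hp).1 b (by simp)
      by_cases heq : a = b
      · subst heq
        constructor
        · intro _ hnd
          exact (List.pairwise_cons.mp hnd).1 a (by simp) rfl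
        · intro _
          simp
      · have hnotmem : a ∉ (b :: t') := by
          intro hm
          rcases List.mem_cons.mp hm with h1 | h2
          · exact heq h1
          · have hbc : b ≤ a := (List.pairwise_cons.mp hp').1 a h2
            exact heq (le_antisymm hab hbc)
        have hstep : ((a :: b :: t').zip ((a :: b :: t').drop 1)).any (fun p => p.1 == p.2)
            = ((b :: t').zip ((b :: t').drop 1)).any (fun p => p.1 == p.2) := by
          simp [List.any_cons, heq]
        rw [hstep, ih hp']
        simp [List.nodup_cons, hnotmem]

theorem pv_row_eq (row : List String) :
    chkRowLoop row [] = dupSorted row := by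
  have h1 := pv_loop_iff row [] List.nodup_nil
  rw [List.nil_append] at h1
  unfold dupSorted
  have hperm : (PySem.List.sorted (row.filter (fun x => x ≠ ".")) (fun x => x) false).Perm
      (row.filter (fun x => x ≠ ".")) := PySem.List.sorted_perm _ _ _
  have hpair : (PySem.List.sorted (row.filter (fun x => x ≠ ".")) (fun x => x) false).Pairwise
      (· ≤ ·) := by
    have := PySem.List.sorted_pairwise (xs := row.filter (fun x => x ≠ ".")) (key := fun x => x)
    simpa using this
  have h2 := pv_adj_iff _ hpair
  rw [hperm.nodup_iff] at h2
  cases hc : chkRowLoop row [] with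
  | true =>
    symm
    exact h2.mpr (h1.mp hc)
  | false =>
    symm
    rw [Bool.eq_false_iff]
    intro hany
    exact absurd (h1.mpr (h2.mp hany)) (by simp [hc])

theorem pv_eq (board : List (List String)) : chk_row board = chk_row_alt board := by
  induction board with
  | nil => rfl
  | cons row rest ih =>
    by_cases h : dupSorted row = true
    · simp [chk_row, chk_row_alt, pv_row_eq, h]
    · simp only [Bool.not_eq_true] at h
      have e1 : chk_row (row :: rest) = chk_row rest := by
        simp [chk_row, pv_row_eq, h]
      have e2 : chk_row_alt (row :: rest) = chk_row_alt rest := by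
        simp [chk_row_alt, h]
      rw [e1, e2, ih]

-- ===== VERDICT (by name: the statement is the Claim_ definition above) =====
theorem chk_row_spec : Claim_equal_chk_row := fun board _ => pv_eq board
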